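-- pv_equiv track=rewrite | github.com/stubifox/advent-of-code-2020 | door2/puzzle2.py | validate_1
-- ===== SOURCE A (Python) =====
-- def validate_1(min, max, cha, pw: str, counter=0):
--     if len(pw) == 0:
--         return counter >= min and counter <= max
--     if counter > max:
--         return False
--     if pw[0] == cha:
--         return validate_1(min, max, cha, pw[1:], counter + 1)
--     return validate_1(min, max, cha, pw[1:], counter)
-- ===== SOURCE B (Python) =====
-- def validate_1(min, max, cha, pw: str, counter=0):
--     count = counter
--     for c in pw:
--         if c == cha:
--             count += 1
--     return min <= count <= max
-- ===== Notes on version B (the rewrite author's own statement) =====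
-- stated objective: simpler
-- what changed: Replaced per-character tail recursion with slicing (and an early counter>max exit) by a single explicit counting loop followed by one final range check.
import Mathlib
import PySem

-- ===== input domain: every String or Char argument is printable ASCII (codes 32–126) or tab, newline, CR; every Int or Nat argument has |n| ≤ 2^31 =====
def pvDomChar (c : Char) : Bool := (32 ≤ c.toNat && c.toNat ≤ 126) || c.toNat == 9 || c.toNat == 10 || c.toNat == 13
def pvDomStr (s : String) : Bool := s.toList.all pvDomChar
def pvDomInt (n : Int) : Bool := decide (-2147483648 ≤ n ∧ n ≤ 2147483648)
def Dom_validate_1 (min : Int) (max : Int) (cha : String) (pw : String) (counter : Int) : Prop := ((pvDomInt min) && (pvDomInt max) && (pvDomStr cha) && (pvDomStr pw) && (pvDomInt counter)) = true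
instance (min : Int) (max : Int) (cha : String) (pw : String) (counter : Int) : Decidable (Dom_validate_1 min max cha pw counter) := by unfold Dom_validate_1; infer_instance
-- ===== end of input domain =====

-- B replaces A's per-character tail recursion (with an early counter>max exit) by one
-- explicit counting loop and a single final range check (objective: simpler).

-- ===== PORT A =====
-- A recurses on the string: empty → range check, early False if counter > max,
-- else recurse on the tail with counter bumped when the head equals cha.
def validate_1_go (min max : Int) (cha : String) (l : List Char) (counter : Int) : Bool :=
  match l with
  | [] => decide (counter ≥ min ∧ counter ≤ max)
  | c :: rest =>
    if counter > max then false
    else if String.mk [c] == cha then validate_1_go min max cha rest (counter + 1)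
    else validate_1_go min max cha rest counter

def validate_1 (min : Int) (max : Int) (cha : String) (pw : String) (counter : Int) : Bool :=
  validate_1_go min max cha pw.toList counter

-- ===== PORT B =====
def validate_1_alt (min : Int) (max : Int) (cha : String) (pw : String) (counter : Int) : Bool :=
  let count := pw.toList.foldl (fun acc c => if String.mk [c] == cha then acc + 1 else acc) counter
  decide (min ≤ count ∧ count ≤ max)

-- ===== PRECONDITION & SPEC =====
def Spec_validate_1 (min : Int) (max : Int) (cha : String) (pw : String) (counter : Int) (out : Bool) : Prop := out = validate_1_alt min max cha pw counter
instance (min : Int) (max : Int) (cha : String) (pw : String) (counter : Int) (out : Bool) : Decidable (Spec_validate_1 min max cha pw counter out) := by unfold Spec_validate_1; infer_instance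

-- ===== CLAIM (what is proved, stated in full; the proofs are below) =====
def Claim_equal_validate_1 : Prop := ∀ (min : Int) (max : Int) (cha : String) (pw : String) (counter : Int), Dom_validate_1 min max cha pw counter → Spec_validate_1 min max cha pw counter (validate_1 min max cha pw counter)

-- ===== LEMMAS AND PROOFS =====

-- the fold's accumulator never decreases
theorem pv_fold_ge (cha : String) (l : List Char) (counter : Int) :
    counter ≤ l.foldl (fun acc c => if String.mk [c] == cha then acc + 1 else acc) counter := by
  induction l generalizing counter with
  | nil => simp
  | cons c rest ih =>
    simp only [List.foldl]
    by_cases h : String.mk [c] == cha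
    · simp only [h, if_pos]
      exact le_trans (by omega) (ih (counter + 1))
    · simp only [h, if_neg]
      exact ih counter

theorem pv_go_eq_fold (min max : Int) (cha : String) (l : List Char) (counter : Int) :
    validate_1_go min max cha l counter =
      decide (min ≤ l.foldl (fun acc c => if String.mk [c] == cha then acc + 1 else acc) counter ∧
        l.foldl (fun acc c => if String.mk [c] == cha then acc + 1 else acc) counter ≤ max) := by
  induction l generalizing counter with
  | nil => simp [validate_1_go, ge_iff_le]
  | cons c rest ih =>
    simp only [validate_1_go, List.foldl]
    by_cases hm : counter > max
    · have hge := pv_fold_ge cha rest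
      by_cases h : String.mk [c] == cha
      · have := hge (counter + 1)
        simp only [h, if_pos, hm, if_true]
        symm
        simp only [decide_eq_false_iff_not]
        omega
      · have := hge counter
        simp only [h, hm, Bool.false_eq_true, if_false, if_true]
        symm
        simp only [decide_eq_false_iff_not]
        omega
    · simp only [hm, if_neg, if_false]
      by_cases h : String.mk [c] == cha
      · simp only [h, if_pos]; exact ih (counter + 1)
      · simp only [h, if_neg]; exact ih counter

-- ===== VERDICT (by name: the statement is the Claim_ definition above) =====
theorem validate_1_spec : Claim_equal_validate_1 := by
  intro min max cha pw counter _
  unfold Spec_validate_1 validate_1 validate_1_alt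
  exact pv_go_eq_fold min max cha pw.toList counter
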